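-- pv_equiv track=rewrite | github.com/kklee0930/Algorithm | 프로그래머스/lv0/120956. 옹알이 （1）/옹알이 （1）.py | solution
-- ===== SOURCE A (Python) =====
-- def solution(babbling):
--     speakable = ['aya', 'ye', 'woo', 'ma']
--     answer = 0
--
--     for babble in babbling: #["ayaye", "uuuma", "ye", "yemawoo", "ayaa"]
--         checker = ''
--         count = 0
--         for char in babble:
--             # checker에 iteration통한 문자열 추가
--             checker += char
--             # 쌓인 문자열이 speakable에 포함 여부 체크
--             if checker in speakable:
--                 checker = ''
--                 count += 1
--         # 포함여부 확인 및 클리어 여부 확인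
--         if count > 0 and checker == '':
--             answer += 1
--     return answer
-- ===== SOURCE B (Python) =====
-- def solution(babbling):
--     def ok(s):
--         if s == '':
--             return True
--         for t in ('aya', 'ye', 'woo', 'ma'):
--             if s.startswith(t):
--                 return ok(s[len(t):])
--         return False
--     return sum(1 for word in babbling if word != '' and ok(word))
-- ===== Notes on version B (the rewrite author's own statement) =====
-- stated objective: simpler
-- what changed: Replaced the per-character accumulator with a recursive tokenizer that strips one speakable token prefix at a time (valid because the four tokens start with distinct letters), counting words via a comprehension.
import Mathlib
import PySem

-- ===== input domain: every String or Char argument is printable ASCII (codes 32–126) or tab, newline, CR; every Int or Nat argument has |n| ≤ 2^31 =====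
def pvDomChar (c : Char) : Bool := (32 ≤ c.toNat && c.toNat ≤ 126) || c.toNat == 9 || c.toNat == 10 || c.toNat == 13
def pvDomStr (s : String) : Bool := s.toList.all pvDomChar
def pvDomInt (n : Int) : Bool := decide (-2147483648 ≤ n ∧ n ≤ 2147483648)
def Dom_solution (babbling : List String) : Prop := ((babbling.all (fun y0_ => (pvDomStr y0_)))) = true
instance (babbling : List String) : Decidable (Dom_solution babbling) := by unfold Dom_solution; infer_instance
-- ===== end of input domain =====

-- B replaces A's per-character accumulator by a recursive token-prefix tokenizer (simpler decomposition; same cost).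

-- ===== PORT A =====
-- the 'speakable' list of A, as lists of characters
def pvSpeakable : List (List Char) := [['a','y','a'], ['y','e'], ['w','o','o'], ['m','a']]

-- one step of A's inner loop: append the char to checker, reset on a full token
def pvStep (st : List Char × Int) (c : Char) : List Char × Int :=
  let checker := st.1 ++ [c]
  if pvSpeakable.contains checker then ([], st.2 + 1) else (checker, st.2)

def solution (babbling : List String) : Int :=
  babbling.foldl (fun answer babble =>
    let r := babble.toList.foldl pvStep ([], 0)
    if r.2 > 0 ∧ r.1 = [] then answer + 1 else answer) 0

-- ===== PORT B =====
-- Source B's recursive helper ok: strip one speakable token prefix, recurse on the rest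
def pvOk : List Char → Bool
  | [] => true
  | c :: r =>
    if ['a','y','a'].isPrefixOf (c :: r) then pvOk ((c :: r).drop 3)
    else if ['y','e'].isPrefixOf (c :: r) then pvOk ((c :: r).drop 2)
    else if ['w','o','o'].isPrefixOf (c :: r) then pvOk ((c :: r).drop 3)
    else if ['m','a'].isPrefixOf (c :: r) then pvOk ((c :: r).drop 2)
    else false
termination_by s => s.length
decreasing_by all_goals simp

def solution_alt (babbling : List String) : Int :=
  babbling.foldl (fun acc word => if word ≠ "" ∧ pvOk word.toList then acc + 1 else acc) 0

-- ===== PRECONDITION & SPEC =====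
def Spec_solution (babbling : List String) (out : Int) : Prop := out = solution_alt babbling
instance (babbling : List String) (out : Int) : Decidable (Spec_solution babbling out) := by unfold Spec_solution; infer_instance

-- ===== CLAIM (what is proved, stated in full; the proofs are below) =====
def Claim_equal_solution : Prop := ∀ (babbling : List String), Dom_solution babbling → Spec_solution babbling (solution babbling)

-- ===== LEMMAS AND PROOFS =====

-- the count component of A's inner loop never decreases
theorem pvStep_mono (cs : List Char) (st : List Char × Int) :
    st.2 ≤ (cs.foldl pvStep st).2 := by
  induction cs generalizing st with
  | nil => simp
  | cons c r ih =>
    refine le_trans ?_ (ih (pvStep st c))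
    simp [pvStep]; split <;> simp

-- if no speakable token is a prefix of buf ++ cs, A's inner loop never resets
theorem pvNoHit (cs buf : List Char) (cnt : Int)
    (h : ∀ t ∈ pvSpeakable, ¬ t <+: (buf ++ cs)) :
    cs.foldl pvStep (buf, cnt) = (buf ++ cs, cnt) := by
  induction cs generalizing buf with
  | nil => simp
  | cons c r ih =>
    have hnot : (buf ++ [c]) ∉ pvSpeakable := fun hc =>
      h _ hc (((buf ++ [c]).prefix_append r).trans (by simp))
    have : List.foldl pvStep (buf, cnt) (c :: r) = List.foldl pvStep (buf ++ [c], cnt) r := by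
      simp [pvStep, hnot]
    rw [this, ih (buf ++ [c]) (by simpa using h)]
    simp

-- main per-word invariant, by strong induction on the word length
theorem pvMain (n : ℕ) : ∀ (cs : List Char), cs.length ≤ n → ∀ (cnt : Int),
    ((cs.foldl pvStep ([], cnt)).1 = [] ↔ pvOk cs = true) ∧
    (cs ≠ [] → pvOk cs = true → cnt < (cs.foldl pvStep ([], cnt)).2) := by
  induction n with
  | zero =>
    intro cs hlen cnt
    have : cs = [] := by cases cs <;> simp_all
    subst this; simp [pvOk]
  | succ n ih =>
    intro cs hlen cnt
    match cs with
    | [] => simp [pvOk]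
    | c :: r =>
      by_cases h1 : ['a','y','a'] <+: (c :: r)
      · obtain ⟨rest, hrest⟩ := h1
        have hcr : c :: r = 'a' :: 'y' :: 'a' :: rest := hrest.symm
        rw [hcr]
        have hfold : List.foldl pvStep ([], cnt) ('a' :: 'y' :: 'a' :: rest)
            = List.foldl pvStep ([], cnt + 1) rest := by
          simp [pvStep, pvSpeakable]
        have hok : pvOk ('a' :: 'y' :: 'a' :: rest) = pvOk rest := by
          rw [pvOk]; simp [List.isPrefixOf]
        have hlen' : rest.length ≤ n := by
          have := hlen; rw [hcr] at this; simp at this; omega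
        have IH := ih rest hlen' (cnt + 1)
        refine ⟨by rw [hfold, hok]; exact IH.1, fun _ _ => ?_⟩
        rw [hfold]
        have := pvStep_mono rest ([], cnt + 1)
        omega
      · by_cases h2 : ['y','e'] <+: (c :: r)
        · obtain ⟨rest, hrest⟩ := h2
          have hcr : c :: r = 'y' :: 'e' :: rest := hrest.symm
          rw [hcr]
          have hfold : List.foldl pvStep ([], cnt) ('y' :: 'e' :: rest)
              = List.foldl pvStep ([], cnt + 1) rest := by
            simp [pvStep, pvSpeakable]
          have hok : pvOk ('y' :: 'e' :: rest) = pvOk rest := by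
            rw [pvOk]; simp [List.isPrefixOf]
          have hlen' : rest.length ≤ n := by
            have := hlen; rw [hcr] at this; simp at this; omega
          have IH := ih rest hlen' (cnt + 1)
          refine ⟨by rw [hfold, hok]; exact IH.1, fun _ _ => ?_⟩
          rw [hfold]
          have := pvStep_mono rest ([], cnt + 1)
          omega
        · by_cases h3 : ['w','o','o'] <+: (c :: r)
          · obtain ⟨rest, hrest⟩ := h3
            have hcr : c :: r = 'w' :: 'o' :: 'o' :: rest := hrest.symm
            rw [hcr]
            have hfold : List.foldl pvStep ([], cnt) ('w' :: 'o' :: 'o' :: rest)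
                = List.foldl pvStep ([], cnt + 1) rest := by
              simp [pvStep, pvSpeakable]
            have hok : pvOk ('w' :: 'o' :: 'o' :: rest) = pvOk rest := by
              rw [pvOk]; simp [List.isPrefixOf]
            have hlen' : rest.length ≤ n := by
              have := hlen; rw [hcr] at this; simp at this; omega
            have IH := ih rest hlen' (cnt + 1)
            refine ⟨by rw [hfold, hok]; exact IH.1, fun _ _ => ?_⟩
            rw [hfold]
            have := pvStep_mono rest ([], cnt + 1)
            omega
          · by_cases h4 : ['m','a'] <+: (c :: r)
            · obtain ⟨rest, hrest⟩ := h4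
              have hcr : c :: r = 'm' :: 'a' :: rest := hrest.symm
              rw [hcr]
              have hfold : List.foldl pvStep ([], cnt) ('m' :: 'a' :: rest)
                  = List.foldl pvStep ([], cnt + 1) rest := by
                simp [pvStep, pvSpeakable]
              have hok : pvOk ('m' :: 'a' :: rest) = pvOk rest := by
                rw [pvOk]; simp [List.isPrefixOf]
              have hlen' : rest.length ≤ n := by
                have := hlen; rw [hcr] at this; simp at this; omega
              have IH := ih rest hlen' (cnt + 1)
              refine ⟨by rw [hfold, hok]; exact IH.1, fun _ _ => ?_⟩
              rw [hfold]
              have := pvStep_mono rest ([], cnt + 1)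
              omega
            · -- no token is a prefix: loop never resets and ok is false
              have hno : ∀ t ∈ pvSpeakable, ¬ t <+: (([] : List Char) ++ (c :: r)) := by
                intro t ht
                rw [List.nil_append]
                simp [pvSpeakable] at ht
                rcases ht with h | h | h | h <;> subst h <;> assumption
              have hfold := pvNoHit (c :: r) [] cnt hno
              have hok : pvOk (c :: r) = false := by
                rw [pvOk]
                simp only [← List.isPrefixOf_iff_prefix] at h1 h2 h3 h4
                simp [h1, h2, h3, h4]
              rw [hfold]
              simp [hok]

-- per-word: A's acceptance condition coincides with B's
theorem pvWord (b : String) :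
    ((b.toList.foldl pvStep ([], 0)).2 > 0 ∧ (b.toList.foldl pvStep ([], 0)).1 = [])
      ↔ (b ≠ "" ∧ pvOk b.toList = true) := by
  have M := pvMain b.toList.length b.toList le_rfl 0
  have hne : b ≠ "" ↔ b.toList ≠ [] := not_congr String.toList_eq_nil_iff.symm
  constructor
  · rintro ⟨hcnt, hbuf⟩
    have hok := M.1.mp hbuf
    refine ⟨hne.mpr ?_, hok⟩
    intro hc
    rw [hc] at hcnt
    simp at hcnt
  · rintro ⟨hb, hok⟩
    exact ⟨M.2 (hne.mp hb) hok, M.1.mpr hok⟩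

theorem pvFold (babbling : List String) : ∀ (acc : Int),
    babbling.foldl (fun answer babble =>
      let r := babble.toList.foldl pvStep ([], 0)
      if r.2 > 0 ∧ r.1 = [] then answer + 1 else answer) acc
    = babbling.foldl (fun acc word => if word ≠ "" ∧ pvOk word.toList then acc + 1 else acc) acc := by
  induction babbling with
  | nil => intro acc; rfl
  | cons b bs ih =>
    intro acc
    simp only [List.foldl_cons]
    rw [show (if (b.toList.foldl pvStep ([], 0)).2 > 0 ∧ (b.toList.foldl pvStep ([], 0)).1 = []
        then acc + 1 else acc)
      = (if b ≠ "" ∧ pvOk b.toList then acc + 1 else acc) by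
        rcases Decidable.em (b ≠ "" ∧ pvOk b.toList = true) with h | h
        · rw [if_pos ((pvWord b).mpr h), if_pos h]
        · rw [if_neg (fun hc => h ((pvWord b).mp hc)), if_neg h]]
    exact ih _

-- ===== VERDICT (by name: the statement is the Claim_ definition above) =====
theorem solution_spec : Claim_equal_solution := by
  intro babbling _
  unfold Spec_solution solution solution_alt
  exact pvFold babbling 0
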